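-- pv_equiv track=rewrite | github.com/Sona-py/ACA-python-2 | week1/homework1.py | mirror_string
-- ===== SOURCE A (Python) =====
-- def mirror_string(a:str):
--     n=list(a)
--     b=[]
--     s=''
--     for i in n:
--         if 65<=ord(i)<= 90:
--             b.append(chr(90-(26-(90-ord(i))-1)))
--
--         elif 97<=ord(i)<=122:
--             b.append(chr(122-(26-(122-ord(i))-1)))
--
--         else:
--             b.append(i)
--
--     return s.join(b)
-- ===== SOURCE B (Python) =====
-- def mirror_string(a: str):
--     # One case-folded positional lookup in a reversed alphabet replaces the
--     # two arithmetic branches: mirror(c) is the letter at c's position in the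
--     # alphabet read backwards, with c's case restored afterwards.
--     low = "abcdefghijklmnopqrstuvwxyz"
--     rev = low[::-1]
--
--     def mirror(c):
--         i = low.find(c.lower())
--         if i < 0:
--             return c
--         return rev[i].upper() if c.isupper() else rev[i]
--
--     return ''.join(mirror(c) for c in a)
-- ===== Notes on version B (the rewrite author's own statement) =====
-- stated objective: alternative
-- what changed: Instead of per-case ord arithmetic with magic constants, B case-folds each character, looks up its position in the alphabet and reads the mirrored letter out of the reversed alphabet string, restoring the original case; mapping by positional lookup in a reversed sequence rather than computed codepoints.
import Mathlib
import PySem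

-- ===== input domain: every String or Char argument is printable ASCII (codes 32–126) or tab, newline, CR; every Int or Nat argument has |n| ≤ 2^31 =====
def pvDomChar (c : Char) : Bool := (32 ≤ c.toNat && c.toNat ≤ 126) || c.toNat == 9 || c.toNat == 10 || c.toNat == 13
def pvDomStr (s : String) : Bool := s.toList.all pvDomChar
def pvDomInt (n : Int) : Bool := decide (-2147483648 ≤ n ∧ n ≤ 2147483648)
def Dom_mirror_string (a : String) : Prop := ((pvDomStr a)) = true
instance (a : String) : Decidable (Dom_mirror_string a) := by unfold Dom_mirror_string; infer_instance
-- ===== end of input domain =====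

-- B replaces A's per-case ord arithmetic by a case-folded positional lookup in the reversed alphabet.

-- ===== PORT A =====
def mirror_string (a : String) : String :=
  let n := a.toList
  let b := n.foldl (fun b i =>
    if 65 ≤ i.toNat ∧ i.toNat ≤ 90 then
      b ++ [Char.ofNat (90 - (26 - (90 - i.toNat) - 1))]
    else if 97 ≤ i.toNat ∧ i.toNat ≤ 122 then
      b ++ [Char.ofNat (122 - (26 - (122 - i.toNat) - 1))]
    else
      b ++ [i]) ([] : List Char)
  String.mk b

-- ===== PORT B =====
-- low = "abcdefghijklmnopqrstuvwxyz"
def pvLow : List Char :=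
  ['a','b','c','d','e','f','g','h','i','j','k','l','m','n','o','p','q','r','s','t','u','v','w','x','y','z']

-- rev = low[::-1]  (step -1 never yields none; getD [] only makes the match total)
def pvRev : List Char := (PySem.List.slice? pvLow none none (-1)).getD []

-- mirror(c): i = low.find(c.lower()); non-letters pass through; rev[i] with case restored.
-- rev[i] is ported by pyGet?; the getD c default is unreachable (0 ≤ i < 26 there), a totality guard only.
def pvMirror (c : Char) : Char :=
  let i := PySem.Chars.find pvLow [PySem.Chars.lowerChar c]
  if i < 0 then c
  else
    let r := (PySem.List.pyGet? pvRev i).getD c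
    if PySem.Chars.isupper c then PySem.Chars.upperChar r else r

-- ''.join(mirror(c) for c in a)
def mirror_string_alt (a : String) : String :=
  String.mk (a.toList.map pvMirror)

-- ===== PRECONDITION & SPEC =====
def Spec_mirror_string (a : String) (out : String) : Prop := out = mirror_string_alt a
instance (a : String) (out : String) : Decidable (Spec_mirror_string a out) := by unfold Spec_mirror_string; infer_instance

-- ===== CLAIM (what is proved, stated in full; the proofs are below) =====
def Claim_equal_mirror_string : Prop := ∀ (a : String), Dom_mirror_string a → Spec_mirror_string a (mirror_string a)

-- ===== LEMMAS AND PROOFS =====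

-- A's per-character result as a function
def pvFA (i : Char) : Char :=
  if 65 ≤ i.toNat ∧ i.toNat ≤ 90 then Char.ofNat (90 - (26 - (90 - i.toNat) - 1))
  else if 97 ≤ i.toNat ∧ i.toNat ≤ 122 then Char.ofNat (122 - (26 - (122 - i.toNat) - 1))
  else i

theorem pv_foldA (l acc : List Char) :
    l.foldl (fun b i =>
      if 65 ≤ i.toNat ∧ i.toNat ≤ 90 then
        b ++ [Char.ofNat (90 - (26 - (90 - i.toNat) - 1))]
      else if 97 ≤ i.toNat ∧ i.toNat ≤ 122 then
        b ++ [Char.ofNat (122 - (26 - (122 - i.toNat) - 1))]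
      else
        b ++ [i]) acc = acc ++ l.map pvFA := by
  induction l generalizing acc with
  | nil => simp
  | cons h t ih =>
    simp only [List.foldl_cons, List.map_cons, ih, pvFA]
    split_ifs <;> simp

set_option maxRecDepth 8000 in
theorem pv_pointwise_bool : ((List.range 127).all
    (fun n => pvFA (Char.ofNat n) == pvMirror (Char.ofNat n))) = true := by
  decide

theorem pv_char_eq (c : Char) (h : pvDomChar c = true) : pvFA c = pvMirror c := by
  have hlt : c.toNat < 127 := by
    simp only [pvDomChar, Bool.or_eq_true, Bool.and_eq_true, decide_eq_true_eq,
      beq_iff_eq] at h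
    omega
  have := beq_iff_eq.mp
    (List.all_eq_true.mp pv_pointwise_bool c.toNat (List.mem_range.mpr hlt))
  rwa [Char.ofNat_toNat] at this

-- ===== VERDICT (by name: the statement is the Claim_ definition above) =====
theorem mirror_string_spec : Claim_equal_mirror_string := by
  intro a ha
  unfold Spec_mirror_string mirror_string mirror_string_alt
  simp only [pv_foldA, List.nil_append]
  congr 1
  apply List.map_congr_left
  intro c hc
  have hdom : pvDomChar c = true := by
    have := ha
    unfold Dom_mirror_string pvDomStr at this
    exact List.all_eq_true.mp this c hc
  exact pv_char_eq c hdom
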